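-- pv_equiv track=rewrite | github.com/aitirga/advent_of_code | 2022/day_3/problem_3.py | process_bag_batch
-- ===== SOURCE A (Python) =====
-- def process_bag_batch(bag_batch, priority_dict: dict):
--     bag_1 = bag_batch[0][0]
--     bag_2 = bag_batch[1][0]
--     bag_3 = bag_batch[2][0]
--     # Perform a triple intersection
--     intersected_bag = set(bag_1).intersection(set(bag_2)).intersection(set(bag_3))
--     common_item_priority = [priority_dict[item] for item in intersected_bag]
--     common_item_priority_max = max(common_item_priority)
--     return common_item_priority_max
-- ===== SOURCE B (Python) =====
-- def process_bag_batch(bag_batch, priority_dict: dict):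
--     # Count, per character, in how many of the three bags' first strings it occurs.
--     counts = {}
--     for bag in bag_batch[:3]:
--         for item in set(bag[0]):
--             counts[item] = counts.get(item, 0) + 1
--     common = [item for item in counts if counts[item] == 3]
--     return max(priority_dict[item] for item in common)
-- ===== Notes on version B (the rewrite author's own statement) =====
-- stated objective: alternative
-- what changed: Replaces the chained set.intersection calls with a single occurrence-count table (dict) built over the three character sets; characters whose count reaches 3 form the common set, whose priorities are then maxed.
import Mathlib
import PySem

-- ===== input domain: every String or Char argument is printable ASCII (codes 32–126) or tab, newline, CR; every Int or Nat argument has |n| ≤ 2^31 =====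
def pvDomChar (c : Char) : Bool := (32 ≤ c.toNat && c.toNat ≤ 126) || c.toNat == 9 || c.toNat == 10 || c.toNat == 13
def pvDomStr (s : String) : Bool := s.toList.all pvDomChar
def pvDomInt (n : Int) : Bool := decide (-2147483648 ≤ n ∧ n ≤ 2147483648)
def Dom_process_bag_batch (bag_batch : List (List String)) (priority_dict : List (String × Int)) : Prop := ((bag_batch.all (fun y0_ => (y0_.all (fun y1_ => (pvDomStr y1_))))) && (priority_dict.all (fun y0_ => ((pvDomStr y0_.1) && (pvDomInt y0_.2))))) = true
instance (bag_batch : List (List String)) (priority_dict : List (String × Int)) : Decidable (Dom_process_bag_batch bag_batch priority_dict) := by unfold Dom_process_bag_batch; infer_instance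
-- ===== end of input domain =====

-- B replaces the chained set.intersection calls with one occurrence-count table over the
-- three character sets (count = 3 ⇔ common); an alternative of the same cost, not faster.

-- ===== PORT A =====
-- priority_dict[item] with the key known present (Pre_): get? of the association dict, default never used
def pvPrio (priority_dict : List (String × Int)) (item : Char) : Int :=
  ((PySem.Dict.mk priority_dict).get? (String.ofList [item])).getD 0

def process_bag_batch (bag_batch : List (List String)) (priority_dict : List (String × Int)) : Int :=
  match PySem.List.pyGet? bag_batch 0, PySem.List.pyGet? bag_batch 1, PySem.List.pyGet? bag_batch 2 with
  | some row1, some row2, some row3 =>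
    match PySem.List.pyGet? row1 0, PySem.List.pyGet? row2 0, PySem.List.pyGet? row3 0 with
    | some bag_1, some bag_2, some bag_3 =>
      let intersected_bag : PySem.Set Char :=
        PySem.Set.inter (PySem.Set.inter (PySem.Set.ofList bag_1.toList) (PySem.Set.ofList bag_2.toList))
          (PySem.Set.ofList bag_3.toList)
      let common_item_priority : List Int := intersected_bag.map (pvPrio priority_dict)
      -- max(...) raises ValueError on an empty list: excluded by Pre_, default never used
      (PySem.List.max? common_item_priority (fun x => x)).getD 0
    | _, _, _ => 0   -- IndexError: excluded by Pre_
  | _, _, _ => 0     -- IndexError: excluded by Pre_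

-- ===== PORT B =====
def process_bag_batch_alt (bag_batch : List (List String)) (priority_dict : List (String × Int)) : Int :=
  let counts : PySem.Dict Char Int :=
    (PySem.List.slice bag_batch none (some 3)).foldl
      (fun d bag =>
        match PySem.List.pyGet? bag 0 with
        | some s => (PySem.Set.ofList s.toList).foldl (fun d item => d.modify item 0 (· + 1)) d
        | none => d)   -- IndexError in the loop: excluded by Pre_
      PySem.Dict.empty
  let common : List Char := counts.keys.filter (fun item => counts.getD item 0 == 3)
  (PySem.List.max? (common.map (pvPrio priority_dict)) (fun x => x)).getD 0

-- ===== PRECONDITION & SPEC =====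
-- Pre_ = exactly where A returns: at least three rows, each of the first three rows nonempty
-- (else IndexError), the three-way character intersection nonempty (else ValueError from max),
-- and every common character present in priority_dict (else KeyError).
def Pre_process_bag_batch (bag_batch : List (List String)) (priority_dict : List (String × Int)) : Prop :=
  3 ≤ bag_batch.length ∧
  bag_batch.getD 0 [] ≠ [] ∧ bag_batch.getD 1 [] ≠ [] ∧ bag_batch.getD 2 [] ≠ [] ∧
  ((bag_batch.getD 0 []).getD 0 "").toList.filter (fun c =>
      ((bag_batch.getD 1 []).getD 0 "").toList.contains c &&
      ((bag_batch.getD 2 []).getD 0 "").toList.contains c) ≠ [] ∧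
  (((bag_batch.getD 0 []).getD 0 "").toList.filter (fun c =>
      ((bag_batch.getD 1 []).getD 0 "").toList.contains c &&
      ((bag_batch.getD 2 []).getD 0 "").toList.contains c)).all (fun c =>
    (priority_dict.map (fun p => p.1.toList)).contains [c]) = true

instance (bag_batch : List (List String)) (priority_dict : List (String × Int)) : Decidable (Pre_process_bag_batch bag_batch priority_dict) := by unfold Pre_process_bag_batch; infer_instance

def pvWitness_process_bag_batch : List (List String) × (List (String × Int)) :=
  ([["ab"], ["bc"], ["b"]], [("b", 2)])

def Spec_process_bag_batch (bag_batch : List (List String)) (priority_dict : List (String × Int)) (out : Int) : Prop := out = process_bag_batch_alt bag_batch priority_dict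
instance (bag_batch : List (List String)) (priority_dict : List (String × Int)) (out : Int) : Decidable (Spec_process_bag_batch bag_batch priority_dict out) := by unfold Spec_process_bag_batch; infer_instance

-- ===== CLAIM (what is proved, stated in full; the proofs are below) =====
def Claim_equal_process_bag_batch : Prop := ∀ (bag_batch : List (List String)) (priority_dict : List (String × Int)), Dom_process_bag_batch bag_batch priority_dict → Pre_process_bag_batch bag_batch priority_dict → Spec_process_bag_batch bag_batch priority_dict (process_bag_batch bag_batch priority_dict)

-- ===== LEMMAS AND PROOFS =====

-- max() of a nonempty Int list depends only on which values occur
lemma pv_max_getD_eq_of_mem_iff (xs ys : List Int) (hx : xs ≠ [])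
    (h : ∀ a, a ∈ xs ↔ a ∈ ys) :
    (PySem.List.max? xs (fun x => x)).getD 0 = (PySem.List.max? ys (fun x => x)).getD 0 := by
  have hy : ys ≠ [] := by
    rcases xs with _ | ⟨x, t⟩
    · exact absurd rfl hx
    · exact List.ne_nil_of_mem ((h x).mp (List.mem_cons_self))
  rcases hmx : PySem.List.max? xs (fun x => x) with _ | mx
  · exact absurd ((PySem.List.max?_eq_none_iff xs _).mp hmx) hx
  rcases hmy : PySem.List.max? ys (fun x => x) with _ | my
  · exact absurd ((PySem.List.max?_eq_none_iff ys _).mp hmy) hy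
  simp only [Option.getD_some]
  exact le_antisymm (PySem.List.max?_isMax hmy mx ((h mx).mp (PySem.List.max?_mem hmx)))
    (PySem.List.max?_isMax hmx my ((h my).mpr (PySem.List.max?_mem hmy)))

-- count of a character in a deduplicated character set, as a 0/1 indicator
lemma pv_count_ofList (l : List Char) (c : Char) :
    ((PySem.Set.ofList l).count c : Int) = if c ∈ l then 1 else 0 := by
  by_cases h : c ∈ l
  · rw [List.count_eq_one_of_mem (PySem.Set.nodup_ofList l) ((PySem.Set.mem_ofList l c).mpr h)]
    simp [h]
  · rw [List.count_eq_zero.mpr (fun hm => h ((PySem.Set.mem_ofList l c).mp hm))]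
    simp [h]

theorem process_bag_batch_spec : Claim_equal_process_bag_batch := by
  intro bag_batch priority_dict _hdom hpre
  obtain ⟨hlen, h1, h2, h3, hne, _hkeys⟩ := hpre
  rcases bag_batch with _ | ⟨r1, rest⟩; · simp at hlen
  rcases rest with _ | ⟨r2, rest⟩; · simp at hlen
  rcases rest with _ | ⟨r3, rest⟩; · simp at hlen
  simp only [List.getD_cons_zero, List.getD_cons_succ] at h1 h2 h3 hne
  rcases r1 with _ | ⟨s1, w1⟩; · exact absurd rfl h1
  rcases r2 with _ | ⟨s2, w2⟩; · exact absurd rfl h2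
  rcases r3 with _ | ⟨s3, w3⟩; · exact absurd rfl h3
  simp only [List.getD_cons_zero] at hne
  unfold Spec_process_bag_batch process_bag_batch process_bag_batch_alt
  have g0 : PySem.List.pyGet? ((s1::w1)::(s2::w2)::(s3::w3)::rest) 0 = some (s1::w1) := by
    simp [PySem.List.pyGet?, PySem.List.pyIdx?, show (0:Int) ≤ (rest.length:Int)+1+1 by omega]
  have g1 : PySem.List.pyGet? ((s1::w1)::(s2::w2)::(s3::w3)::rest) 1 = some (s2::w2) := by
    simp [PySem.List.pyGet?, PySem.List.pyIdx?, show (0:Int) ≤ (rest.length:Int)+1 by omega]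
  have g2 : PySem.List.pyGet? ((s1::w1)::(s2::w2)::(s3::w3)::rest) 2 = some (s3::w3) := by
    simp [PySem.List.pyGet?, PySem.List.pyIdx?, show (2:Int) ≤ (rest.length:Int)+1+1 by omega,
      show Int.toNat 2 = 2 from rfl]
  have f1 : PySem.List.pyGet? (s1::w1) 0 = some s1 := by simp [PySem.List.pyGet?, PySem.List.pyIdx?]
  have f2 : PySem.List.pyGet? (s2::w2) 0 = some s2 := by simp [PySem.List.pyGet?, PySem.List.pyIdx?]
  have f3 : PySem.List.pyGet? (s3::w3) 0 = some s3 := by simp [PySem.List.pyGet?, PySem.List.pyIdx?]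
  simp only [g0, g1, g2, f1, f2, f3]
  -- reduce B's slice and outer loop
  have hsl : PySem.List.slice ((s1::w1)::(s2::w2)::(s3::w3)::rest) none (some 3)
      = [s1::w1, s2::w2, s3::w3] := by
    rw [PySem.List.slice_to _ (by norm_num)]; rfl
  rw [hsl]
  simp only [List.foldl_cons, List.foldl_nil, f1, f2, f3]
  -- characterise B's counts
  set d3 : PySem.Dict Char Int :=
    ((PySem.Set.ofList s3.toList).foldl (fun d item => d.modify item 0 (· + 1))
      ((PySem.Set.ofList s2.toList).foldl (fun d item => d.modify item 0 (· + 1))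
        ((PySem.Set.ofList s1.toList).foldl (fun d item => d.modify item 0 (· + 1))
          PySem.Dict.empty))) with hd3
  have hcnt : ∀ c : Char, d3.getD c 0 =
      (if c ∈ s1.toList then (1:Int) else 0) + (if c ∈ s2.toList then 1 else 0) +
      (if c ∈ s3.toList then 1 else 0) := by
    intro c
    rw [hd3, PySem.Dict.getD_foldl_modify_add_one, PySem.Dict.getD_foldl_modify_add_one,
      PySem.Dict.getD_foldl_modify_add_one, PySem.Dict.getD_empty,
      pv_count_ofList, pv_count_ofList, pv_count_ofList]
    ring
  have hkeys3 : ∀ c : Char, c ∈ d3.keys ↔ c ∈ s1.toList ∨ c ∈ s2.toList ∨ c ∈ s3.toList := by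
    intro c
    rw [hd3, PySem.Dict.keys_foldl_modify, PySem.Dict.keys_foldl_modify,
      PySem.Dict.keys_foldl_modify, PySem.Dict.keys_empty]
    simp only [PySem.Set.mem_update, PySem.Set.mem_ofList, List.not_mem_nil, false_or, or_assoc]
  -- membership in B's common list ↔ membership in A's intersection
  have hchar : ∀ c : Char,
      (c ∈ PySem.Set.inter (PySem.Set.inter (PySem.Set.ofList s1.toList)
          (PySem.Set.ofList s2.toList)) (PySem.Set.ofList s3.toList)) ↔
      c ∈ d3.keys.filter (fun item => d3.getD item 0 == 3) := by
    intro c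
    rw [List.mem_filter, PySem.Set.mem_inter, PySem.Set.mem_inter,
      PySem.Set.mem_ofList, PySem.Set.mem_ofList, PySem.Set.mem_ofList, hkeys3,
      beq_iff_eq, hcnt c]
    constructor
    · rintro ⟨⟨hm1, hm2⟩, hm3⟩
      exact ⟨Or.inl hm1, by simp [hm1, hm2, hm3]⟩
    · rintro ⟨_, heq⟩
      by_cases hm1 : c ∈ s1.toList <;> by_cases hm2 : c ∈ s2.toList <;>
        by_cases hm3 : c ∈ s3.toList <;> simp [hm1, hm2, hm3] at heq ⊢
  -- both priority lists are the same set of values; A's is nonempty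
  rcases List.exists_mem_of_ne_nil _ hne with ⟨c0, hc0⟩
  rw [List.mem_filter] at hc0
  have hc0' : c0 ∈ PySem.Set.inter (PySem.Set.inter (PySem.Set.ofList s1.toList)
      (PySem.Set.ofList s2.toList)) (PySem.Set.ofList s3.toList) := by
    rw [PySem.Set.mem_inter, PySem.Set.mem_inter, PySem.Set.mem_ofList,
      PySem.Set.mem_ofList, PySem.Set.mem_ofList]
    have := hc0.2
    simp only [Bool.and_eq_true, List.contains_iff_mem] at this
    exact ⟨⟨hc0.1, this.1⟩, this.2⟩
  apply pv_max_getD_eq_of_mem_iff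
  · exact List.ne_nil_of_mem (List.mem_map_of_mem hc0')
  · intro a
    simp only [List.mem_map]
    constructor
    · rintro ⟨c, hc, rfl⟩; exact ⟨c, (hchar c).mp hc, rfl⟩
    · rintro ⟨c, hc, rfl⟩; exact ⟨c, (hchar c).mpr hc, rfl⟩
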